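-- pv_equiv track=rewrite | github.com/antoncp/training_exercises | AllocatingHotelRooms.py | allocate_rooms
-- ===== SOURCE A (Python) =====
-- from collections import defaultdict
--
-- def allocate_rooms(customers):
--     rooms = defaultdict(list)
--     key = 1
--     for customer in sorted(customers):
--         added = False
--         for k, v in rooms.items():
--             if v[-1][-1] < customer[0]:
--                 rooms[k].append(customer)
--                 added = True
--                 break
--         if not added:
--             rooms[key].append(customer)
--             key += 1
--     rooms_list = []
--     for customer in customers:
--         for k, v in rooms.items():
--             if customer in v:
--                 rooms_list.append(k)
--                 v.remove(customer)
--                 break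
--     return rooms_list
-- ===== SOURCE B (Python) =====
-- def allocate_rooms(customers):
--     deps = []     # deps[r] = departure of the last customer placed in room r+1
--     queue = {}    # customer (as tuple) -> rooms assigned to its copies, in placement order
--     for c in sorted(customers):
--         a = c[0]
--         r = next((j for j in range(len(deps)) if deps[j] < a), None)
--         if r is None:
--             r = len(deps)
--             deps.append(c[-1])
--         else:
--             deps[r] = c[-1]
--         queue.setdefault(tuple(c), []).append(r + 1)
--     return [queue[tuple(c)].pop(0) for c in customers]
-- ===== Notes on version B (the rewrite author's own statement) =====
-- stated objective: alternative
-- what changed: B keeps only each room's last departure time (instead of A's dict of full per-room customer lists) during the single sorted greedy pass, records the room assigned to each customer value in a per-value queue, and emits the answer with one linear pass popping those queues, so A's second pass of per-customer scans over all room lists (with list-valued membership tests and remove() calls) disappears.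
-- outside the precondition, e.g. on allocate_rooms([[]]): A returns [1], B raises IndexError
import Mathlib
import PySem

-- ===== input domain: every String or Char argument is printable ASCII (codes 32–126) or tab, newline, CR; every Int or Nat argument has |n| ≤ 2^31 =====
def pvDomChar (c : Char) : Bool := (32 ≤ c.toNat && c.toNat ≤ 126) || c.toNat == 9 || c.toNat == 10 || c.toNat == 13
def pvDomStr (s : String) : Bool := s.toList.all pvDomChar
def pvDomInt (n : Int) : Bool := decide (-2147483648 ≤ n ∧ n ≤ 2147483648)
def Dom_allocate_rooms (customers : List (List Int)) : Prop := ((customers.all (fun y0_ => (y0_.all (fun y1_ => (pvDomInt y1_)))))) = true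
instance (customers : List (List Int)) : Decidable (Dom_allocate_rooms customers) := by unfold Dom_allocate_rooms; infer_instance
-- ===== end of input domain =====

-- B keeps only each room's last departure (instead of A's dict of full per-room customer
-- lists), records each value's assigned rooms in per-value queues during the sorted greedy
-- pass, and emits the answer by popping those queues, removing A's second pass of
-- per-customer scans over all room lists.

-- ===== PORT A =====
-- v[-1][-1]: last departure recorded in a room's customer list (Python raises on empty; excluded by Pre_)
def pvLastLast (v : List (List Int)) : Int :=
  PySem.List.pyGetD (PySem.List.pyGetD v (-1) []) (-1) 0

-- 'for k, v in rooms.items(): if v[-1][-1] < customer[0]: … break'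
def pvFindFree (items : List (Int × List (List Int))) (a : Int) : Option Int :=
  match items with
  | [] => none
  | (k, v) :: rest => if pvLastLast v < a then some k else pvFindFree rest a

-- one iteration of A's first loop (state: rooms dict, next fresh key)
def pvPlace (st : PySem.Dict Int (List (List Int)) × Int) (c : List Int) :
    PySem.Dict Int (List (List Int)) × Int :=
  match pvFindFree st.1.items (PySem.List.pyGetD c 0 0) with
  | some k => (st.1.modify k [] (· ++ [c]), st.2)
  | none   => (st.1.modify st.2 [] (· ++ [c]), st.2 + 1)

-- 'for k, v in rooms.items(): if customer in v: … break'
def pvFindRoomWith (items : List (Int × List (List Int))) (c : List Int) : Option Int :=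
  match items with
  | [] => none
  | (k, v) :: rest => if c ∈ v then some k else pvFindRoomWith rest c

-- one iteration of A's second loop (state: rooms dict, output list)
def pvCollect (st : PySem.Dict Int (List (List Int)) × List Int) (c : List Int) :
    PySem.Dict Int (List (List Int)) × List Int :=
  match pvFindRoomWith st.1.items c with
  | some k => (st.1.modify k [] (fun v => (PySem.List.remove? v c).getD v), st.2 ++ [k])
  | none   => (st.1, st.2)

def allocate_rooms (customers : List (List Int)) : List Int :=
  let st := (PySem.List.sorted customers (fun x => x) false).foldl pvPlace (PySem.Dict.empty, 1)
  (customers.foldl pvCollect (st.1, [])).2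

-- ===== PORT B =====
-- next((j for j in range(len(deps)) if deps[j] < a), None)
def pvFirstFree (deps : List Int) (a : Int) : Option Nat :=
  match deps with
  | [] => none
  | d :: rest => if d < a then some 0 else (pvFirstFree rest a).map (· + 1)

-- one iteration of B's sorted pass (state: deps, queue dict); queue.setdefault(t,[]).append(r+1)
def pvStepB (st : List Int × PySem.Dict (List Int) (List Int)) (c : List Int) :
    List Int × PySem.Dict (List Int) (List Int) :=
  let a := PySem.List.pyGetD c 0 0
  let b := PySem.List.pyGetD c (-1) 0
  match pvFirstFree st.1 a with
  | none   => (st.1 ++ [b], st.2.modify c [] (· ++ [(st.1.length : Int) + 1]))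
  | some r => (st.1.set r b, st.2.modify c [] (· ++ [(r : Int) + 1]))

-- queue[tuple(c)].pop(0)  (never fails on the admitted inputs; skip is unreachable)
def pvPopB (st : PySem.Dict (List Int) (List Int) × List Int) (c : List Int) :
    PySem.Dict (List Int) (List Int) × List Int :=
  match PySem.List.pop? (st.1.getD c []) 0 with
  | some (v, rest) => (st.1.insert c rest, st.2 ++ [v])
  | none           => st

def allocate_rooms_alt (customers : List (List Int)) : List Int :=
  let st := (PySem.List.sorted customers (fun x => x) false).foldl pvStepB ([], PySem.Dict.empty)
  (customers.foldl pvPopB (st.2, [])).2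

-- ===== PRECONDITION & SPEC =====
-- Pre_ excludes inputs containing an empty customer list: there Python A raises IndexError on
-- 'customer[0]'/'v[-1][-1]' (except the single input [[]], where A returns [1] but B raises too).
def Pre_allocate_rooms (customers : List (List Int)) : Prop :=
  ∀ c ∈ customers, c ≠ []
instance (customers : List (List Int)) : Decidable (Pre_allocate_rooms customers) := by
  unfold Pre_allocate_rooms; infer_instance

def pvWitness_allocate_rooms : List (List Int) := [[1, 5], [2, 6], [6, 7], [1, 2]]

def Spec_allocate_rooms (customers : List (List Int)) (out : List Int) : Prop := out = allocate_rooms_alt customers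
instance (customers : List (List Int)) (out : List Int) : Decidable (Spec_allocate_rooms customers out) := by unfold Spec_allocate_rooms; infer_instance

-- ===== CLAIM (what is proved, stated in full; the proofs are below) =====
def Claim_equal_allocate_rooms : Prop := ∀ (customers : List (List Int)), Dom_allocate_rooms customers → Pre_allocate_rooms customers → Spec_allocate_rooms customers (allocate_rooms customers)

-- ===== LEMMAS AND PROOFS =====

-- deps after placing one customer
def pvDeps1 (deps : List Int) (c : List Int) : List Int :=
  match pvFirstFree deps (PySem.List.pyGetD c 0 0) with
  | none   => deps ++ [PySem.List.pyGetD c (-1) 0]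
  | some r => deps.set r (PySem.List.pyGetD c (-1) 0)

-- the (customer, room) pairs emitted by the sorted greedy pass
def pvSeq (deps : List Int) (cs : List (List Int)) : List (List Int × Int) :=
  match cs with
  | [] => []
  | c :: rest =>
    (match pvFirstFree deps (PySem.List.pyGetD c 0 0) with
     | none   => (c, (deps.length : Int) + 1)
     | some r => (c, (r : Int) + 1)) :: pvSeq (pvDeps1 deps c) rest

-- room groups evolving on the A side (room j+1 ↦ its list of customers, in key order)
def pvGs1 (gs : List (List (List Int))) (c : List Int) : List (List (List Int)) :=
  match pvFirstFree (gs.map pvLastLast) (PySem.List.pyGetD c 0 0) with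
  | none   => gs ++ [[c]]
  | some r => gs.modify r (· ++ [c])

-- the items list of A's rooms dict when the groups are gs, keys k0, k0+1, …
def pvItemsOf (gs : List (List (List Int))) (k0 : Int) : List (Int × List (List Int)) :=
  match gs with
  | [] => []
  | g :: rest => (k0, g) :: pvItemsOf rest (k0 + 1)

-- first index j with c ∈ gs[j] (abstract view of A's second-loop scan)
def pvFirstWith (gs : List (List (List Int))) (c : List Int) : Option Nat :=
  match gs with
  | [] => none
  | g :: rest => if c ∈ g then some 0 else (pvFirstWith rest c).map (· + 1)

-- the per-value room queue produced by the sorted pass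
def pvQ (s : List (List Int)) (x : List Int) : List Int :=
  ((pvSeq [] s).filter (fun p => p.1 == x)).map (·.2)

-- ---- B phase 1 ----
theorem pv_foldB (cs : List (List Int)) : ∀ (deps : List Int) (q : PySem.Dict (List Int) (List Int)),
    (cs.foldl pvStepB (deps, q)).2
      = (pvSeq deps cs).foldl (fun d p => d.modify p.1 [] (· ++ [p.2])) q := by
  induction cs with
  | nil => intro deps q; rfl
  | cons c rest ih =>
    intro deps q
    simp only [List.foldl_cons, pvSeq]
    cases h : pvFirstFree deps (PySem.List.pyGetD c 0 0) with
    | none => simpa [pvStepB, pvDeps1, h] using ih _ _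
    | some r => simpa [pvStepB, pvDeps1, h] using ih _ _

-- ---- firstFree spec ----
theorem pv_firstFree_some {deps : List Int} {a : Int} {r : Nat} (h : pvFirstFree deps a = some r) :
    r < deps.length ∧ deps[r]! < a ∧ ∀ j, j < r → ¬ (deps[j]! < a) := by
  induction deps generalizing r with
  | nil => simp [pvFirstFree] at h
  | cons d rest ih =>
    by_cases hd : d < a
    · simp [pvFirstFree, hd] at h
      subst h
      exact ⟨by simp, by simpa using hd, by omega⟩
    · simp [pvFirstFree, hd] at h
      obtain ⟨r', hr', rfl⟩ := h
      obtain ⟨h1, h2, h3⟩ := ih hr'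
      refine ⟨by simpa using h1, by simpa using h2, ?_⟩
      intro j hj
      cases j with
      | zero => simpa using hd
      | succ j => simpa using h3 j (by omega)

theorem pv_firstFree_none {deps : List Int} {a : Int} (h : pvFirstFree deps a = none) :
    ∀ j, j < deps.length → ¬ (deps[j]! < a) := by
  induction deps with
  | nil => intro j hj; simp at hj
  | cons d rest ih =>
    intro j hj
    by_cases hd : d < a
    · simp [pvFirstFree, hd] at h
    · simp [pvFirstFree, hd] at h
      cases j with
      | zero => simpa using hd
      | succ j =>
        simp only [List.length_cons] at hj
        simpa using ih h j (by omega)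

-- ---- items-list view of A's dict ----
theorem pv_itemsOf_append (gs : List (List (List Int))) (g : List (List Int)) : ∀ (k0 : Int),
    pvItemsOf (gs ++ [g]) k0 = pvItemsOf gs k0 ++ [(k0 + gs.length, g)] := by
  induction gs with
  | nil => intro k0; simp [pvItemsOf]
  | cons g' rest ih =>
    intro k0
    have harith : k0 + 1 + ((rest.length : Nat) : Int) = k0 + ((rest.length + 1 : Nat) : Int) := by
      push_cast; ring
    simp only [List.cons_append, pvItemsOf, ih, List.length_cons, harith]

theorem pv_get?_itemsOf (gs : List (List (List Int))) : ∀ (k0 : Int) (r : Nat) (h : r < gs.length),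
    (PySem.Dict.mk (pvItemsOf gs k0)).get? (k0 + r) = some gs[r] := by
  induction gs with
  | nil => intro k0 r h; simp at h
  | cons g rest ih =>
    intro k0 r h
    cases r with
    | zero => simp [pvItemsOf, PySem.Dict.get?_mk_cons]
    | succ r =>
      rw [pvItemsOf, PySem.Dict.get?_mk_cons]
      have hne : (k0 == k0 + ((r : Nat) + 1 : Nat)) = false := by
        simp only [beq_eq_false_iff_ne, ne_eq]
        push_cast
        omega
      rw [hne]
      simp only [Bool.false_eq_true, if_false]
      have := ih (k0 + 1) r (by simpa using h)
      have harith : (k0 + 1) + (r : Int) = k0 + ((r : Nat) + 1 : Nat) := by push_cast; ring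
      rw [harith] at this
      simpa using this

theorem pv_get?_itemsOf_ge (gs : List (List (List Int))) : ∀ (k0 k : Int), k0 + gs.length ≤ k →
    (PySem.Dict.mk (pvItemsOf gs k0)).get? k = none := by
  induction gs with
  | nil => intro k0 k _; simp [pvItemsOf, PySem.Dict.get?]
  | cons g rest ih =>
    intro k0 k hk
    simp only [List.length_cons] at hk
    rw [pvItemsOf, PySem.Dict.get?_mk_cons]
    have hne : (k0 == k) = false := by
      simp only [beq_eq_false_iff_ne, ne_eq]
      push_cast at hk ⊢
      omega
    rw [hne]
    simp only [Bool.false_eq_true, if_false]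
    exact ih (k0 + 1) k (by push_cast at hk ⊢; omega)

theorem pv_itemsOf_map_lt (gs : List (List (List Int))) (k : Int) (v : List (List Int)) :
    ∀ (k0 : Int), k < k0 →
    (pvItemsOf gs k0).map (fun p => if p.1 == k then (k, v) else p) = pvItemsOf gs k0 := by
  induction gs with
  | nil => intro k0 _; rfl
  | cons g rest ih =>
    intro k0 hk
    simp only [pvItemsOf, List.map_cons]
    rw [if_neg (by simp; omega), ih (k0 + 1) (by omega)]

theorem pv_itemsOf_map_set (gs : List (List (List Int))) (v : List (List Int)) :
    ∀ (k0 : Int) (r : Nat), r < gs.length →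
    (pvItemsOf gs k0).map (fun p => if p.1 == k0 + (r : Int) then (k0 + (r : Int), v) else p)
      = pvItemsOf (gs.set r v) k0 := by
  induction gs with
  | nil => intro k0 r h; simp at h
  | cons g rest ih =>
    intro k0 r h
    cases r with
    | zero =>
      simp only [pvItemsOf, List.map_cons, Nat.cast_zero, add_zero, List.set_cons_zero]
      rw [if_pos (by simp), pv_itemsOf_map_lt rest k0 v (k0 + 1) (by omega)]
    | succ r =>
      simp only [pvItemsOf, List.map_cons, List.set_cons_succ]
      rw [if_neg (by simp; omega)]
      have harith : k0 + ((r : Nat) + 1 : Int) = (k0 + 1) + (r : Int) := by ring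
      have := ih (k0 + 1) r (by simpa using h)
      push_cast
      rw [harith, this]

theorem pv_contains_itemsOf (gs : List (List (List Int))) (k0 : Int) (r : Nat) (h : r < gs.length) :
    (PySem.Dict.mk (pvItemsOf gs k0)).contains (k0 + r) = true := by
  rw [PySem.Dict.contains_eq_isSome_get?, pv_get?_itemsOf gs k0 r h]
  rfl

theorem pv_modify_itemsOf_lt (gs : List (List (List Int))) (f : List (List Int) → List (List Int)) :
    ∀ (k0 : Int) (r : Nat), r < gs.length →
    (PySem.Dict.mk (pvItemsOf gs k0)).modify (k0 + r) [] f
      = PySem.Dict.mk (pvItemsOf (gs.modify r f) k0) := by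
  intro k0 r h
  unfold PySem.Dict.modify
  have hg : (PySem.Dict.mk (pvItemsOf gs k0)).getD (k0 + r) [] = gs[r] := by
    rw [PySem.Dict.getD_eq_get?_getD, pv_get?_itemsOf gs k0 r h]
    rfl
  apply PySem.Dict.ext
  rw [hg, PySem.Dict.items_insert_of_contains _ _ (pv_contains_itemsOf gs k0 r h)]
  rw [List.modify_eq_set_get f h]
  exact pv_itemsOf_map_set gs (f gs[r]) k0 r h

theorem pv_modify_itemsOf_append (gs : List (List (List Int))) (f : List (List Int) → List (List Int)) (k0 : Int) :
    (PySem.Dict.mk (pvItemsOf gs k0)).modify (k0 + gs.length) [] f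
      = PySem.Dict.mk (pvItemsOf (gs ++ [f []]) k0) := by
  unfold PySem.Dict.modify
  have hnone : (PySem.Dict.mk (pvItemsOf gs k0)).get? (k0 + gs.length) = none :=
    pv_get?_itemsOf_ge gs k0 _ le_rfl
  have hg : (PySem.Dict.mk (pvItemsOf gs k0)).getD (k0 + gs.length) [] = [] := by
    rw [PySem.Dict.getD_eq_get?_getD, hnone]; rfl
  have hc : (PySem.Dict.mk (pvItemsOf gs k0)).contains (k0 + gs.length) = false := by
    rw [PySem.Dict.contains_eq_isSome_get?, hnone]; rfl
  apply PySem.Dict.ext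
  rw [hg, PySem.Dict.items_insert_of_not_contains _ _ hc, pv_itemsOf_append gs (f []) k0]

-- ---- the two scans of A's first/second loop, on the items list ----
theorem pv_findFree_itemsOf (a : Int) (gs : List (List (List Int))) : ∀ (k0 : Int),
    pvFindFree (pvItemsOf gs k0) a
      = (pvFirstFree (gs.map pvLastLast) a).map (fun r : Nat => k0 + (r : Int)) := by
  induction gs with
  | nil => intro k0; rfl
  | cons g rest ih =>
    intro k0
    simp only [pvItemsOf, pvFindFree, List.map_cons, pvFirstFree]
    by_cases hg : pvLastLast g < a
    · simp [hg]
    · rw [if_neg hg, if_neg hg, ih (k0 + 1)]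
      cases pvFirstFree (rest.map pvLastLast) a with
      | none => rfl
      | some r => simp; ring

theorem pv_findRoomWith_itemsOf (c : List Int) (gs : List (List (List Int))) : ∀ (k0 : Int),
    pvFindRoomWith (pvItemsOf gs k0) c
      = (pvFirstWith gs c).map (fun j : Nat => k0 + (j : Int)) := by
  induction gs with
  | nil => intro k0; rfl
  | cons g rest ih =>
    intro k0
    simp only [pvItemsOf, pvFindRoomWith, pvFirstWith]
    by_cases hg : c ∈ g
    · simp [hg]
    · rw [if_neg hg, if_neg hg, ih (k0 + 1)]
      cases pvFirstWith rest c with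
      | none => rfl
      | some r => simp; ring

theorem pv_firstWith_eq_some {gs : List (List (List Int))} {c : List Int} {j0 : Nat}
    (hlt : j0 < gs.length) (hmem : c ∈ gs[j0]) (hnot : ∀ j, j < j0 → c ∉ gs[j]!) :
    pvFirstWith gs c = some j0 := by
  induction gs generalizing j0 with
  | nil => simp at hlt
  | cons g rest ih =>
    cases j0 with
    | zero => simp only [List.getElem_cons_zero] at hmem; simp [pvFirstWith, hmem]
    | succ j0 =>
      have hg : c ∉ g := by simpa using hnot 0 (by omega)
      rw [pvFirstWith, if_neg hg,
        ih (by simpa using hlt) (by simpa using hmem)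
          (fun j hj => by simpa using hnot (j + 1) (by omega))]
      rfl

theorem pv_firstWith_eq_none {gs : List (List (List Int))} {c : List Int}
    (h : ∀ j (hj : j < gs.length), c ∉ gs[j]) :
    pvFirstWith gs c = none := by
  induction gs with
  | nil => rfl
  | cons g rest ih =>
    rw [pvFirstWith, if_neg (by simpa using h 0 (by simp)),
      ih (fun j hj => by simpa using h (j + 1) (by simpa using hj))]
    rfl

-- ---- group evolution commutes with departures ----
theorem pv_map_lastLast_gs1 (gs : List (List (List Int))) (c : List Int) :
    (pvGs1 gs c).map pvLastLast = pvDeps1 (gs.map pvLastLast) c := by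
  cases h : pvFirstFree (gs.map pvLastLast) (PySem.List.pyGetD c 0 0) with
  | none =>
    simp only [pvGs1, pvDeps1, h, List.map_append, List.map_cons, List.map_nil]
    simp [pvLastLast, pysem]
  | some r =>
    have hr : r < gs.length := by simpa using (pv_firstFree_some h).1
    simp only [pvGs1, pvDeps1, h]
    rw [List.modify_eq_set_get _ hr, List.map_set]
    have hl : pvLastLast (gs[r] ++ [c]) = PySem.List.pyGetD c (-1) 0 := by
      simp [pvLastLast, PySem.List.pyGetD_neg_one_append_singleton]
    simp only [List.get_eq_getElem, hl]

theorem pv_map_lastLast_fold (cs : List (List Int)) : ∀ (gs : List (List (List Int))),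
    (cs.foldl pvGs1 gs).map pvLastLast = cs.foldl pvDeps1 (gs.map pvLastLast) := by
  induction cs with
  | nil => intro gs; rfl
  | cons c rest ih =>
    intro gs
    simp only [List.foldl_cons, ih, pv_map_lastLast_gs1]

-- ---- A phase 1 ----
theorem pv_foldA (cs : List (List Int)) : ∀ (gs : List (List (List Int))),
    cs.foldl pvPlace (PySem.Dict.mk (pvItemsOf gs 1), (gs.length : Int) + 1)
      = (PySem.Dict.mk (pvItemsOf (cs.foldl pvGs1 gs) 1), ((cs.foldl pvGs1 gs).length : Int) + 1) := by
  induction cs with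
  | nil => intro gs; rfl
  | cons c rest ih =>
    intro gs
    simp only [List.foldl_cons]
    have hfind := pv_findFree_itemsOf (PySem.List.pyGetD c 0 0) gs 1
    have hstep : pvPlace (PySem.Dict.mk (pvItemsOf gs 1), (gs.length : Int) + 1) c
        = (PySem.Dict.mk (pvItemsOf (pvGs1 gs c) 1), ((pvGs1 gs c).length : Int) + 1) := by
      cases h : pvFirstFree (gs.map pvLastLast) (PySem.List.pyGetD c 0 0) with
      | none =>
        rw [h] at hfind
        simp only [Option.map_none] at hfind
        simp only [pvPlace, pvGs1, h, hfind]
        rw [show (gs.length : Int) + 1 = 1 + (gs.length : Int) from by ring,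
          pv_modify_itemsOf_append gs (· ++ [c]) 1]
        simp only [Prod.mk.injEq, List.nil_append, List.length_append, List.length_cons,
          List.length_nil]
        constructor
        · trivial
        · push_cast; ring
      | some r =>
        have hr : r < gs.length := by simpa using (pv_firstFree_some h).1
        rw [h] at hfind
        simp only [Option.map_some] at hfind
        simp only [pvPlace, pvGs1, h, hfind]
        rw [pv_modify_itemsOf_lt gs (· ++ [c]) 1 r hr]
        simp [List.length_modify]
    rw [hstep, ih (pvGs1 gs c)]

-- ---- A's groups, read off the emitted (customer, room) pairs ----
theorem pv_groups_of_seq (cs : List (List Int)) : ∀ (gs : List (List (List Int))) (j : Nat),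
    ((cs.foldl pvGs1 gs)[j]?.getD [])
      = (gs[j]?.getD []) ++ ((pvSeq (gs.map pvLastLast) cs).filter (fun p => p.2 == (j : Int) + 1)).map (·.1) := by
  induction cs with
  | nil => intro gs j; simp [pvSeq]
  | cons c rest ih =>
    intro gs j
    simp only [List.foldl_cons, pvSeq]
    cases h : pvFirstFree (gs.map pvLastLast) (PySem.List.pyGetD c 0 0) with
    | some r =>
      have hr : r < gs.length := by simpa using (pv_firstFree_some h).1
      have hgs1 : pvGs1 gs c = gs.modify r (· ++ [c]) := by unfold pvGs1; rw [h]
      have hdl : pvDeps1 (gs.map pvLastLast) c = (pvGs1 gs c).map pvLastLast :=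
        (pv_map_lastLast_gs1 gs c).symm
      rw [hdl, hgs1, List.filter_cons]
      by_cases hj : r = j
      · subst hj
        rw [if_pos (by simp)]
        have hmem : (gs.modify r (· ++ [c]))[r]?.getD [] = gs[r] ++ [c] := by
          rw [List.getElem?_modify]
          simp [hr]
        have := ih (gs.modify r (· ++ [c])) r
        rw [this, hmem]
        simp [hr, List.append_assoc]
      · rw [if_neg (by simp; omega)]
        have hmem : (gs.modify r (· ++ [c]))[j]?.getD [] = gs[j]?.getD [] := by
          rw [List.getElem?_modify]
          cases hgj : gs[j]? with
          | none => simp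
          | some g => simp [hj]
        have := ih (gs.modify r (· ++ [c])) j
        rw [this, hmem]
    | none =>
      have hgs1 : pvGs1 gs c = gs ++ [[c]] := by unfold pvGs1; rw [h]
      have hdl : pvDeps1 (gs.map pvLastLast) c = (pvGs1 gs c).map pvLastLast :=
        (pv_map_lastLast_gs1 gs c).symm
      rw [hdl, hgs1, List.filter_cons, List.length_map]
      by_cases hj : j = gs.length
      · subst hj
        rw [if_pos (by simp)]
        have hmem : (gs ++ [[c]])[gs.length]?.getD [] = [c] := by simp
        have := ih (gs ++ [[c]]) gs.length
        rw [this, hmem]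
        simp
      · rw [if_neg (by simp; omega)]
        have hmem : (gs ++ [[c]])[j]?.getD [] = gs[j]?.getD [] := by
          by_cases hlt : j < gs.length
          · rw [List.getElem?_append_left hlt]
          · have h1 : gs[j]? = none := by
              rw [List.getElem?_eq_none_iff]; omega
            have h2 : (gs ++ [[c]])[j]? = none := by
              rw [List.getElem?_eq_none_iff]; simp; omega
            rw [h1, h2]
        rw [ih (gs ++ [[c]]) j, hmem]


-- ---- rooms emitted are in range ----
theorem pv_len_deps1 (deps : List Int) (c : List Int) : deps.length ≤ (pvDeps1 deps c).length := by
  unfold pvDeps1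
  cases pvFirstFree deps (PySem.List.pyGetD c 0 0) <;> simp

theorem pv_len_fold_deps (cs : List (List Int)) : ∀ (deps : List Int),
    deps.length ≤ (cs.foldl pvDeps1 deps).length := by
  induction cs with
  | nil => intro deps; simp
  | cons c rest ih =>
    intro deps
    simp only [List.foldl_cons]
    exact le_trans (pv_len_deps1 deps c) (ih (pvDeps1 deps c))

theorem pv_seq_mem_range (cs : List (List Int)) : ∀ (deps : List Int),
    ∀ p ∈ pvSeq deps cs, 1 ≤ p.2 ∧ p.2 ≤ ((cs.foldl pvDeps1 deps).length : Int) := by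
  induction cs with
  | nil => intro deps p hp; simp [pvSeq] at hp
  | cons c rest ih =>
    intro deps p hp
    simp only [List.foldl_cons]
    rw [pvSeq] at hp
    cases h : pvFirstFree deps (PySem.List.pyGetD c 0 0) with
    | none =>
      simp only [h] at hp
      rcases List.mem_cons.mp hp with hhd | htl
      · subst hhd
        have hlen : (pvDeps1 deps c).length = deps.length + 1 := by
          unfold pvDeps1; rw [h]; simp
        have hle := pv_len_fold_deps rest (pvDeps1 deps c)
        rw [hlen] at hle
        constructor
        · simp only []
          omega
        · simp only []
          omega
      · exact ih (pvDeps1 deps c) p htl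
    | some r =>
      simp only [h] at hp
      rcases List.mem_cons.mp hp with hhd | htl
      · subst hhd
        have hr : r < deps.length := (pv_firstFree_some h).1
        have hlen : deps.length ≤ (pvDeps1 deps c).length := pv_len_deps1 deps c
        have hle := pv_len_fold_deps rest (pvDeps1 deps c)
        constructor
        · simp only []
          omega
        · simp only []
          omega
      · exact ih (pvDeps1 deps c) p htl

-- ---- monotonicity of the rooms given to one value (the x-block of the sorted list) ----
theorem pv_seq_not_mem (cs : List (List Int)) {x : List Int} (h : x ∉ cs) : ∀ (deps : List Int),
    (pvSeq deps cs).filter (fun p => p.1 == x) = [] := by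
  induction cs with
  | nil => intro deps; rfl
  | cons c rest ih =>
    intro deps
    have hcx : c ≠ x := fun hc => h (hc ▸ List.mem_cons_self)
    rw [pvSeq, List.filter_cons]
    have hx : x ∉ rest := fun hm => h (List.mem_cons_of_mem _ hm)
    cases hfr : pvFirstFree deps (PySem.List.pyGetD c 0 0) <;>
      simp [hcx, ih hx]

theorem pv_getElem_bang_set_ne (l : List Int) (r j : Nat) (b : Int) (h : j ≠ r) :
    (l.set r b)[j]! = l[j]! := by
  rw [List.getElem!_eq_getElem?_getD, List.getElem!_eq_getElem?_getD,
    List.getElem?_set_ne (Ne.symm h)]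

theorem pv_getElem_bang_append (l : List Int) (j : Nat) (b : Int) (h : j < l.length) :
    (l ++ [b])[j]! = l[j]! := by
  rw [List.getElem!_eq_getElem?_getD, List.getElem!_eq_getElem?_getD,
    List.getElem?_append_left h]

theorem pv_mono (cs : List (List Int)) : ∀ (deps : List Int) (x : List Int) (t : Nat),
    cs.Pairwise (· ≤ ·) → (∀ e ∈ cs, x ≤ e) → t ≤ deps.length →
    (∀ j, j < t → PySem.List.pyGetD x 0 0 ≤ deps[j]!) →
    (((pvSeq deps cs).filter (fun p => p.1 == x)).map (·.2)).Pairwise (· ≤ ·) ∧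
    (∀ v ∈ ((pvSeq deps cs).filter (fun p => p.1 == x)).map (·.2), (t : Int) + 1 ≤ v) := by
  induction cs with
  | nil => intro deps x t _ _ _ _; simp [pvSeq]
  | cons c rest ih =>
    intro deps x t hp hall ht hbound
    obtain ⟨hhead, htail⟩ := List.pairwise_cons.mp hp
    by_cases hcx : c = x
    · subst hcx
      rw [pvSeq, List.filter_cons]
      cases h : pvFirstFree deps (PySem.List.pyGetD c 0 0) with
      | some r =>
        obtain ⟨hr, hra, hfirst⟩ := pv_firstFree_some h
        have htr : t ≤ r := by
          by_contra hlt
          rw [not_le] at hlt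
          exact absurd hra (not_lt.mpr (hbound r (by omega)))
        have hih := ih (deps.set r (PySem.List.pyGetD c (-1) 0)) c r htail hhead
          (by rw [List.length_set]; omega)
          (fun j hj => by
            rw [pv_getElem_bang_set_ne deps r j _ (by omega)]
            exact not_lt.mp (hfirst j hj))
        rw [show deps.set r (PySem.List.pyGetD c (-1) 0) = pvDeps1 deps c from by
          unfold pvDeps1; rw [h]] at hih
        simp only [if_pos (by simp : ((c, (r : Int) + 1).1 == c) = true), List.map_cons]
        constructor
        · rw [List.pairwise_cons]
          exact ⟨fun v hv => le_trans (by omega) (hih.2 v hv), hih.1⟩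
        · intro v hv
          rcases List.mem_cons.mp hv with rfl | hv
          · omega
          · exact le_trans (by omega) (hih.2 v hv)
      | none =>
        have hnone := pv_firstFree_none h
        have hih := ih (deps ++ [PySem.List.pyGetD c (-1) 0]) c deps.length htail hhead
          (by simp)
          (fun j hj => by
            rw [pv_getElem_bang_append deps j _ hj]
            exact not_lt.mp (hnone j hj))
        rw [show deps ++ [PySem.List.pyGetD c (-1) 0] = pvDeps1 deps c from by
          unfold pvDeps1; rw [h]] at hih
        simp only [if_pos (by simp : ((c, (deps.length : Int) + 1).1 == c) = true), List.map_cons]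
        constructor
        · rw [List.pairwise_cons]
          exact ⟨fun v hv => le_trans (by omega) (hih.2 v hv), hih.1⟩
        · intro v hv
          rcases List.mem_cons.mp hv with rfl | hv
          · omega
          · exact le_trans (by omega) (hih.2 v hv)
    · have hxc : x ≤ c := hall c List.mem_cons_self
      have hxltc : x < c := lt_of_le_of_ne hxc (Ne.symm hcx)
      have hnx : x ∉ rest := fun hm => absurd (hhead x hm) (not_le.mpr hxltc)
      rw [pvSeq, List.filter_cons]
      cases hfr : pvFirstFree deps (PySem.List.pyGetD c 0 0) <;>
        simp [show (c == x) = false from by simp [hcx], pv_seq_not_mem rest hnx]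

theorem pv_queue_sorted (cs : List (List Int)) : ∀ (deps : List Int) (x : List Int),
    cs.Pairwise (· ≤ ·) →
    (((pvSeq deps cs).filter (fun p => p.1 == x)).map (·.2)).Pairwise (· ≤ ·) := by
  induction cs with
  | nil => intro deps x _; simp [pvSeq]
  | cons c rest ih =>
    intro deps x hs
    obtain ⟨hhead, htail⟩ := List.pairwise_cons.mp hs
    by_cases hcx : c = x
    · subst hcx
      refine (pv_mono (c :: rest) deps c 0 hs ?_ (by omega) (by omega)).1
      intro e he
      rcases List.mem_cons.mp he with rfl | he
      · exact le_refl _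
      · exact hhead e he
    · rw [pvSeq, List.filter_cons]
      cases hfr : pvFirstFree deps (PySem.List.pyGetD c 0 0) <;>
        simpa [show (c == x) = false from by simp [hcx]] using ih (pvDeps1 deps c) x htail

-- ---- counts of the two transposed readings agree ----
theorem pv_count_transpose (l : List (List Int × Int)) (x : List Int) (k : Int) :
    ((l.filter (fun p => p.2 == k)).map (·.1)).count x
      = ((l.filter (fun p => p.1 == x)).map (·.2)).count k := by
  rw [List.count_eq_countP, List.count_eq_countP, List.countP_map, List.countP_map,
    List.countP_filter, List.countP_filter]
  apply List.countP_congr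
  intro p _
  simp only [Function.comp_apply]
  rw [Bool.and_comm]

-- ---- phase 2: coupled induction ----
theorem pv_phase2 (cs : List (List Int)) : ∀ (gs : List (List (List Int)))
    (q : PySem.Dict (List Int) (List Int)) (out : List Int),
    (∀ (x : List Int) (j : Nat), (gs[j]?.getD []).count x = (q.getD x []).count ((j : Int) + 1)) →
    (∀ x : List Int, (q.getD x []).Pairwise (· ≤ ·)) →
    (∀ (x : List Int), ∀ v ∈ q.getD x [], 1 ≤ v ∧ v ≤ (gs.length : Int)) →
    (cs.foldl pvCollect (PySem.Dict.mk (pvItemsOf gs 1), out)).2 = (cs.foldl pvPopB (q, out)).2 := by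
  induction cs with
  | nil => intro gs q out _ _ _; rfl
  | cons c rest ih =>
    intro gs q out h1 h2 h3
    simp only [List.foldl_cons]
    cases hq : q.getD c [] with
    | nil =>
      have hB : pvPopB (q, out) c = (q, out) := by
        simp [pvPopB, hq, PySem.List.pop?]
      have hnone : pvFindRoomWith (pvItemsOf gs 1) c = none := by
        rw [pv_findRoomWith_itemsOf, pv_firstWith_eq_none, Option.map_none]
        intro j hj
        have hcnt := h1 c j
        rw [hq, List.getElem?_eq_getElem hj] at hcnt
        simp only [Option.getD_some, List.count_nil] at hcnt
        exact List.count_eq_zero.mp hcnt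
      have hA : pvCollect (PySem.Dict.mk (pvItemsOf gs 1), out) c
          = (PySem.Dict.mk (pvItemsOf gs 1), out) := by
        simp [pvCollect, hnone]
      rw [hA, hB]
      exact ih gs q out h1 h2 h3
    | cons hd t =>
      have hdmem : hd ∈ q.getD c [] := by rw [hq]; exact List.mem_cons_self
      have hd_bounds := h3 c hd hdmem
      have hj0lt : (hd - 1).toNat < gs.length := by omega
      set j0 : Nat := (hd - 1).toNat with hj0
      have hj0i : (j0 : Int) = hd - 1 := Int.toNat_of_nonneg (by omega)
      have hjh : (j0 : Int) + 1 = hd := by omega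
      have hcnt := h1 c j0
      rw [hq, List.getElem?_eq_getElem hj0lt, Option.getD_some, hjh] at hcnt
      have hmem : c ∈ gs[j0] := by
        rw [← List.count_pos_iff, hcnt, List.count_cons_self]
        omega
      have hge : ∀ v ∈ hd :: t, hd ≤ v := by
        have hp2 := h2 c
        rw [hq] at hp2
        intro v hv
        rcases List.mem_cons.mp hv with rfl | hv
        · exact le_refl _
        · exact (List.pairwise_cons.mp hp2).1 v hv
      have hnotbefore : ∀ j, j < j0 → c ∉ gs[j]! := by
        intro j hj
        have hcnt' := h1 c j
        rw [hq] at hcnt'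
        have hz : (hd :: t).count ((j : Int) + 1) = 0 := by
          rw [List.count_eq_zero]
          intro hmem'
          have := hge _ hmem'
          omega
        rw [hz] at hcnt'
        have hjlen : j < gs.length := by omega
        rw [List.getElem?_eq_getElem hjlen, Option.getD_some] at hcnt'
        rw [List.getElem!_eq_getElem?_getD, List.getElem?_eq_getElem hjlen, Option.getD_some]
        exact List.count_eq_zero.mp hcnt'
      have hfind : pvFindRoomWith (pvItemsOf gs 1) c = some (1 + (j0 : Int)) := by
        rw [pv_findRoomWith_itemsOf, pv_firstWith_eq_some hj0lt hmem hnotbefore]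
        rfl
      have hA : pvCollect (PySem.Dict.mk (pvItemsOf gs 1), out) c
          = (PySem.Dict.mk (pvItemsOf (gs.modify j0 (fun v => (PySem.List.remove? v c).getD v)) 1),
             out ++ [1 + (j0 : Int)]) := by
        simp only [pvCollect, hfind]
        rw [pv_modify_itemsOf_lt gs _ 1 j0 hj0lt]
      have hB : pvPopB (q, out) c = (q.insert c t, out ++ [hd]) := by
        simp [pvPopB, hq, PySem.List.pop?_zero_cons]
      rw [hA, hB, show (1 : Int) + (j0 : Int) = hd from by omega]
      have hremove : (fun v => (PySem.List.remove? v c).getD v) gs[j0] = gs[j0].erase c := by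
        simp only []
        rw [PySem.List.remove?_eq_some_erase _ _ hmem]
        rfl
      set gs' := gs.modify j0 (fun v => (PySem.List.remove? v c).getD v) with hgs'
      have hgs'j0 : gs'[j0]? = some (gs[j0].erase c) := by
        rw [hgs', List.getElem?_modify, List.getElem?_eq_getElem hj0lt]
        simp [hremove]
      have hgs'ne : ∀ j, j ≠ j0 → gs'[j]? = gs[j]? := by
        intro j hj
        rw [hgs', List.getElem?_modify]
        cases gs[j]? <;> simp [Ne.symm hj]
      have hlen' : gs'.length = gs.length := by rw [hgs', List.length_modify]
      apply ih gs' (q.insert c t) (out ++ [hd])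
      · -- counts
        intro x j
        rw [PySem.Dict.getD_insert]
        by_cases hxc : x = c
        · subst hxc
          rw [if_pos rfl]
          by_cases hjj : j = j0
          · subst hjj
            rw [hgs'j0, Option.getD_some, List.count_erase_self, hcnt, hjh,
              List.count_cons_self]
            omega
          · rw [hgs'ne j hjj]
            have hcnt2 := h1 x j
            rw [hq] at hcnt2
            rw [hcnt2, List.count_cons_of_ne (by omega)]
        · rw [if_neg hxc]
          by_cases hjj : j = j0
          · subst hjj
            rw [hgs'j0, Option.getD_some, List.count_erase_of_ne hxc]
            have hcnt2 := h1 x j0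
            rw [List.getElem?_eq_getElem hj0lt, Option.getD_some] at hcnt2
            rw [hcnt2]
          · rw [hgs'ne j hjj]
            exact h1 x j
      · -- sortedness
        intro x
        rw [PySem.Dict.getD_insert]
        by_cases hxc : x = c
        · subst hxc
          rw [if_pos rfl]
          have hp2 := h2 x
          rw [hq] at hp2
          exact (List.pairwise_cons.mp hp2).2
        · rw [if_neg hxc]
          exact h2 x
      · -- range
        intro x v hv
        rw [PySem.Dict.getD_insert] at hv
        rw [hlen']
        by_cases hxc : x = c
        · subst hxc
          rw [if_pos rfl] at hv
          exact h3 x v (by rw [hq]; exact List.mem_cons_of_mem _ hv)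
        · rw [if_neg hxc] at hv
          exact h3 x v hv

-- ===== VERDICT (by name: the statement is the Claim_ definition above) =====
theorem allocate_rooms_spec : Claim_equal_allocate_rooms := by
  intro customers _ _
  unfold Spec_allocate_rooms
  have hL : allocate_rooms customers
      = (customers.foldl pvCollect
          (((PySem.List.sorted customers (fun x => x) false).foldl pvPlace
              (PySem.Dict.empty, 1)).1, [])).2 := rfl
  have hR : allocate_rooms_alt customers
      = (customers.foldl pvPopB
          (((PySem.List.sorted customers (fun x => x) false).foldl pvStepB
              ([], PySem.Dict.empty)).2, [])).2 := rfl
  rw [hL, hR]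
  set s := PySem.List.sorted customers (fun x => x) false with hsdef
  have hA := pv_foldA s []
  have h0 : (PySem.Dict.mk (pvItemsOf ([] : List (List (List Int))) 1)
        : PySem.Dict Int (List (List Int))) = PySem.Dict.empty := rfl
  have h1 : ((([] : List (List (List Int))).length : Int) + 1) = 1 := by norm_num
  rw [h0, h1] at hA
  rw [hA]
  have hB := pv_foldB s [] PySem.Dict.empty
  rw [hB]
  set GS := s.foldl pvGs1 [] with hGSdef
  set qB := (pvSeq [] s).foldl (fun d p => d.modify p.1 [] (· ++ [p.2])) PySem.Dict.empty
    with hqBdef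
  have hq : ∀ x : List Int, qB.getD x []
      = ((pvSeq [] s).filter (fun p => p.1 == x)).map (·.2) := by
    intro x
    rw [hqBdef, PySem.Dict.getD_foldl_modify_append]
    simp [PySem.Dict.getD_empty]
  have hGS : ∀ j : Nat, GS[j]?.getD []
      = ((pvSeq [] s).filter (fun p => p.2 == (j : Int) + 1)).map (·.1) := by
    intro j
    have := pv_groups_of_seq s [] j
    simpa using this
  have hGSlen : GS.length = (s.foldl pvDeps1 []).length := by
    have := pv_map_lastLast_fold s []
    rw [hGSdef]
    calc (s.foldl pvGs1 []).length = ((s.foldl pvGs1 []).map pvLastLast).length := by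
          rw [List.length_map]
      _ = (s.foldl pvDeps1 []).length := by rw [this]; rfl
  have hpair : s.Pairwise (· ≤ ·) := by
    have h := PySem.List.sorted_pairwise customers (fun x : List Int => x)
    have he : PySem.List.sorted customers (fun x : List Int => x) false
        = @PySem.List.sorted (List Int) (List Int) List.instLinearOrder.toLT
            (@LinearOrder.toDecidableLT (List Int) List.instLinearOrder) customers
            (fun x => x) false := by
      congr 1
    rw [hsdef, he]
    exact h
  apply pv_phase2 customers GS qB []
  · intro x j
    rw [hGS j, hq x]
    exact pv_count_transpose (pvSeq [] s) x ((j : Int) + 1)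
  · intro x
    rw [hq x]
    exact pv_queue_sorted s [] x hpair
  · intro x v hv
    rw [hq x] at hv
    obtain ⟨p, hpf, rfl⟩ := List.mem_map.mp hv
    have hpm : p ∈ pvSeq [] s := List.mem_of_mem_filter hpf
    have := pv_seq_mem_range s [] p hpm
    rw [hGSlen]
    exact this
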